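-- pv_equiv track=rewrite | github.com/alibekula/leetcode_solutions | 1912-DesignMovieRentalSystem/1912-DesignMovieRentalSystem.py | search
-- ===== SOURCE A (Python) =====
-- from collections import deque, defaultdict
--
-- def search(arr: deque, time: int, left: bool = True) -> int:
--     l, r = 0, len(arr)
--
--     while l < r:
--         mid = (l + r) // 2
--
--         if left: # Find first element >= time (lower_bound)
--             if arr[mid][2] >= time:
--                 r = mid
--             else:
--                 l = mid + 1
--         else: # Find first element > time (upper_bound)
--             if arr[mid][2] <= time:
--                 l = mid + 1
--             else:
--                 r = mid
--
--     return l
-- ===== SOURCE B (Python) =====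
-- def search(arr, time: int, left: bool = True) -> int:
--     # Recursive divide-and-conquer on list slices: each call halves a concrete
--     # segment of the array instead of moving index bounds over it.
--     def go(seg, base):
--         if not seg:
--             return base
--         mid = len(seg) // 2
--         v = seg[mid][2]
--         if (v >= time) if left else (v > time):
--             return go(seg[:mid], base)
--         else:
--             return go(seg[mid + 1:], base + mid + 1)
--     return go(list(arr), 0)
-- ===== Notes on version B (the rewrite author's own statement) =====
-- stated objective: alternative
-- what changed: Replaces the iterative two-pointer binary-search loop with a recursive divide-and-conquer over concrete list segments: each call slices the segment at its midpoint and recurses on the half, carrying a base offset, instead of narrowing (l, r) index bounds.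
import Mathlib
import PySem

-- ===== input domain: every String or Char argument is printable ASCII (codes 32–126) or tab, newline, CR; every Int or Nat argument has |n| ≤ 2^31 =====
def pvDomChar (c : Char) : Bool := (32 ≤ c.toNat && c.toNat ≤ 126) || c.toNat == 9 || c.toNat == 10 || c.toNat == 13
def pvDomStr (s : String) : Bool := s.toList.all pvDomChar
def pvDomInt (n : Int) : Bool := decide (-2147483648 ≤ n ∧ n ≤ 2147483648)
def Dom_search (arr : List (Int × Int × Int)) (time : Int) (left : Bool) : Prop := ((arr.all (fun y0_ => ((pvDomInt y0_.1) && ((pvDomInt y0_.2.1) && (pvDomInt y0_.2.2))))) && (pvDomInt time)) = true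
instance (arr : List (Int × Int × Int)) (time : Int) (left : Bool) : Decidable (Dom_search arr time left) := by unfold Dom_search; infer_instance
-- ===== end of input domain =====

-- B replaces A's iterative (l, r) binary-search loop by a recursive divide-and-conquer on
-- concrete list segments (slice at the midpoint, recurse on the half, carry a base offset);
-- the return value is proved identical on every input.

-- ===== PORT A =====
-- the while loop of A, state (l, r); arr[mid] is always in range since the loop keeps l < r ≤ |arr|
def searchLoop (arr : List (Int × Int × Int)) (time : Int) (left : Bool) (l r : Nat) : Nat :=
  if l < r then
    let mid := (l + r) / 2
    let v := (arr.getD mid (0, 0, 0)).2.2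
    if left then
      if v ≥ time then searchLoop arr time left l mid
      else searchLoop arr time left (mid + 1) r
    else
      if v ≤ time then searchLoop arr time left (mid + 1) r
      else searchLoop arr time left l mid
  else l
termination_by r - l
decreasing_by all_goals omega

def search (arr : List (Int × Int × Int)) (time : Int) (left : Bool) : Int :=
  (searchLoop arr time left 0 arr.length : Int)

-- ===== PORT B =====
-- go(seg, base) of Source B; seg[:mid] = seg.take mid and seg[mid+1:] = seg.drop (mid+1) exactly,
-- since 0 ≤ mid ≤ len(seg); seg[mid] is in range because seg is nonempty
def searchGo (time : Int) (left : Bool) (seg : List (Int × Int × Int)) (base : Nat) : Nat :=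
  if seg = [] then base
  else
    let mid := seg.length / 2
    let v := (seg.getD mid (0, 0, 0)).2.2
    if (if left then v ≥ time else v > time) then
      searchGo time left (seg.take mid) base
    else
      searchGo time left (seg.drop (mid + 1)) (base + mid + 1)
termination_by seg.length
decreasing_by
  · rename_i h _
    have : seg.length ≠ 0 := fun hz => h (List.eq_nil_of_length_eq_zero hz)
    simp [List.length_take]; omega
  · rename_i h _
    have : seg.length ≠ 0 := fun hz => h (List.eq_nil_of_length_eq_zero hz)
    simp [List.length_drop]; omega

def search_alt (arr : List (Int × Int × Int)) (time : Int) (left : Bool) : Int :=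
  (searchGo time left arr 0 : Int)

-- ===== PRECONDITION & SPEC =====
def Spec_search (arr : List (Int × Int × Int)) (time : Int) (left : Bool) (out : Int) : Prop := out = search_alt arr time left
instance (arr : List (Int × Int × Int)) (time : Int) (left : Bool) (out : Int) : Decidable (Spec_search arr time left out) := by unfold Spec_search; infer_instance

-- ===== CLAIM (what is proved, stated in full; the proofs are below) =====
def Claim_equal_search : Prop := ∀ (arr : List (Int × Int × Int)) (time : Int) (left : Bool), Dom_search arr time left → Spec_search arr time left (search arr time left)

-- ===== LEMMAS AND PROOFS =====

-- the segment of B mirroring A's (l, r) window: seg = arr[l:r], base = l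
theorem searchLoop_eq_go (arr : List (Int × Int × Int)) (time : Int) (left : Bool) :
    ∀ n l r, r - l ≤ n → r ≤ arr.length →
      searchLoop arr time left l r = searchGo time left ((arr.drop l).take (r - l)) l := by
  intro n
  induction n with
  | zero =>
    intro l r hn hr
    have hlr : ¬ l < r := by omega
    rw [searchLoop, searchGo]
    simp [hlr, Nat.sub_eq_zero_of_le (by omega : r ≤ l)]
  | succ n ih =>
    intro l r hn hr
    by_cases hlr : l < r
    · have hseglen : ((arr.drop l).take (r - l)).length = r - l := by
        simp [List.length_take, List.length_drop]; omega
      have hne : (arr.drop l).take (r - l) ≠ [] := by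
        intro h; rw [h] at hseglen; simp at hseglen; omega
      have hmid : (r - l) / 2 < r - l := by omega
      -- midpoint value agreement: seg[(r-l)/2] = arr[(l+r)/2]
      have habs : l + (r - l) / 2 = (l + r) / 2 := by omega
      have hgetd : (((arr.drop l).take (r - l)).getD ((r - l) / 2) (0,0,0))
          = arr.getD ((l + r) / 2) (0,0,0) := by
        have h1 : (r - l) / 2 < ((arr.drop l).take (r - l)).length := by omega
        have h2 : (l + r) / 2 < arr.length := by omega
        rw [List.getD_eq_getElem _ _ h1, List.getD_eq_getElem _ _ h2]
        rw [List.getElem_take, List.getElem_drop]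
        congr 1
      rw [searchLoop, searchGo]
      simp only [hlr, if_true, hne, if_false, hseglen, hgetd]
      have hmida : (l + r) / 2 < r := by omega
      have hmidb : l ≤ (l + r) / 2 := by omega
      have hA : (l + r) / 2 - l ≤ n := by omega
      have hB : r - ((l + r) / 2 + 1) ≤ n := by omega
      -- the two recursive segments
      have hlow : ((arr.drop l).take (r - l)).take ((r - l) / 2)
          = (arr.drop l).take ((l + r) / 2 - l) := by
        rw [List.take_take]; congr 1; omega
      have hhigh : ((arr.drop l).take (r - l)).drop ((r - l) / 2 + 1)
          = (arr.drop ((l + r) / 2 + 1)).take (r - ((l + r) / 2 + 1)) := by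
        have e1 : (r - l) - ((r - l) / 2 + 1) = r - ((l + r) / 2 + 1) := by omega
        have e2 : l + ((r - l) / 2 + 1) = (l + r) / 2 + 1 := by omega
        rw [List.drop_take, List.drop_drop, e1, e2]
      have ihlow := ih l ((l + r) / 2) hA (by omega)
      have ihhigh := ih ((l + r) / 2 + 1) r hB hr
      have hbase : l + (r - l) / 2 + 1 = (l + r) / 2 + 1 := by omega
      cases left <;> simp only [Bool.false_eq_true, if_true, if_false]
      · by_cases hv : (arr.getD ((l + r) / 2) (0, 0, 0)).2.2 ≤ time
        · simp only [if_pos hv, if_neg (not_lt.mpr hv)]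
          rw [ihhigh, hhigh, hbase]
        · simp only [if_neg hv, if_pos (not_le.mp hv)]
          rw [ihlow, hlow]
      · by_cases hv : time ≤ (arr.getD ((l + r) / 2) (0, 0, 0)).2.2
        · simp only [if_pos hv]
          rw [ihlow, hlow]
        · simp only [if_neg hv]
          rw [ihhigh, hhigh, hbase]
    · rw [searchLoop, searchGo]
      simp [hlr, Nat.sub_eq_zero_of_le (by omega : r ≤ l)]

-- ===== VERDICT (by name: the statement is the Claim_ definition above) =====
theorem search_spec : Claim_equal_search := by
  intro arr time left _
  unfold Spec_search search search_alt
  rw [searchLoop_eq_go arr time left arr.length 0 arr.length (by omega) (le_refl _)]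
  simp
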